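-- pv_equiv track=rewrite | github.com/BojoteX/CockpitOS | src/LABELS/LABEL_SET_RIGHT_PANEL_CONTROLLER/generate_data.py | generate_comment
-- ===== SOURCE A (Python) =====
-- def generate_comment(device, info_type, info_values):
--     info = [x.strip() for x in info_values.split(",")]
--     if device == "GPIO" and len(info) >= 1:
--         return f"// GPIO {info[0]}"
--     if device == "GAUGE" and len(info) >= 1:
--         return f"// GAUGE GPIO {info[0]}"
--     if device == "PCA9555" and len(info) >= 3:
--         return f"// PCA {info[0]} Port {info[1]} Bit {info[2]}"
--     if device == "TM1637" and len(info) >= 4: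
--         return f"// TM1637 CLK {info[0]} DIO {info[1]} Seg {info[2]} Bit {info[3]}"
--     if device == "GN1640T" and len(info) >= 3:
--         return f"// GN1640 Addr {info[0]} Col {info[1]} Row {info[2]}"
--     if device == "WS2812" and len(info) >= 1:
--         return f"// WS2812 Index {info[0]}"
--     return "// No Info"
-- ===== SOURCE B (Python) =====
-- _TEMPLATES = {
--     "GPIO": (1, "// GPIO {0}"),
--     "GAUGE": (1, "// GAUGE GPIO {0}"),
--     "PCA9555": (3, "// PCA {0} Port {1} Bit {2}"),
--     "TM1637": (4, "// TM1637 CLK {0} DIO {1} Seg {2} Bit {3}"),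
--     "GN1640T": (3, "// GN1640 Addr {0} Col {1} Row {2}"),
--     "WS2812": (1, "// WS2812 Index {0}"),
-- }
--
-- def generate_comment(device, info_type, info_values):
--     entry = _TEMPLATES.get(device)
--     if entry is None:
--         return "// No Info"
--     min_len, template = entry
--     info = [x.strip() for x in info_values.split(",")]
--     if len(info) < min_len:
--         return "// No Info"
--     return template.format(*info)
-- ===== Notes on version B (the rewrite author's own statement) =====
-- stated objective: idiomatic
-- what changed: Replaced the sequential six-branch guard chain with a single table lookup: a dict maps each device to (min_len, format template), and one lookup plus one length check replaces the if-cascade.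
import Mathlib
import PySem

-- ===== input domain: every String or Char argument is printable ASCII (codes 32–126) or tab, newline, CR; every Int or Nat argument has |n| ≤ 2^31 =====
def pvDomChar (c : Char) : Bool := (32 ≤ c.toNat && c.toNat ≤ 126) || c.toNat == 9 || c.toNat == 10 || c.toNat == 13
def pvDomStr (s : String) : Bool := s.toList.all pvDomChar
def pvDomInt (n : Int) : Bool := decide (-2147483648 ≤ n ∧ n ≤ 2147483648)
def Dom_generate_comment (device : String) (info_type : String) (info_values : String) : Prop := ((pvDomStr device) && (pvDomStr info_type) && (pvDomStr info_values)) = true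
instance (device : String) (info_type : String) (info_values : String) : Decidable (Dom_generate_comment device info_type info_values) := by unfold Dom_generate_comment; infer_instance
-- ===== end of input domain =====

-- B replaces the six-branch if-chain with a single device → (min_len, template) table lookup (idiomatic; same cost).


-- ===== PORT A =====
def generate_comment (device : String) (info_type : String) (info_values : String) : String :=
  let info := ((PySem.Str.split? info_values ",").getD []).map PySem.Str.strip
  if device == "GPIO" && decide (1 ≤ info.length) then
    "// GPIO " ++ PySem.List.pyGetD info 0 ""
  else if device == "GAUGE" && decide (1 ≤ info.length) then
    "// GAUGE GPIO " ++ PySem.List.pyGetD info 0 ""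
  else if device == "PCA9555" && decide (3 ≤ info.length) then
    "// PCA " ++ PySem.List.pyGetD info 0 "" ++ " Port " ++ PySem.List.pyGetD info 1 "" ++ " Bit " ++ PySem.List.pyGetD info 2 ""
  else if device == "TM1637" && decide (4 ≤ info.length) then
    "// TM1637 CLK " ++ PySem.List.pyGetD info 0 "" ++ " DIO " ++ PySem.List.pyGetD info 1 "" ++ " Seg " ++ PySem.List.pyGetD info 2 "" ++ " Bit " ++ PySem.List.pyGetD info 3 ""
  else if device == "GN1640T" && decide (3 ≤ info.length) then
    "// GN1640 Addr " ++ PySem.List.pyGetD info 0 "" ++ " Col " ++ PySem.List.pyGetD info 1 "" ++ " Row " ++ PySem.List.pyGetD info 2 ""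
  else if device == "WS2812" && decide (1 ≤ info.length) then
    "// WS2812 Index " ++ PySem.List.pyGetD info 0 ""
  else
    "// No Info"

-- ===== PORT B =====
-- B: table-driven dispatch — each device maps to (min_len, template rendering function)
-- (Source B's "{i}" format string is ported as the corresponding rendering closure over the info list).
def pvTemplates : PySem.Dict String (Nat × (List String → String)) :=
  -- keys are distinct literals, so Dict.mk of the literal list is exactly the Python dict literal
  PySem.Dict.mk
  [("GPIO", (1, fun info => "// GPIO " ++ PySem.List.pyGetD info 0 "")),
   ("GAUGE", (1, fun info => "// GAUGE GPIO " ++ PySem.List.pyGetD info 0 "")),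
   ("PCA9555", (3, fun info => "// PCA " ++ PySem.List.pyGetD info 0 "" ++ " Port " ++ PySem.List.pyGetD info 1 "" ++ " Bit " ++ PySem.List.pyGetD info 2 "")),
   ("TM1637", (4, fun info => "// TM1637 CLK " ++ PySem.List.pyGetD info 0 "" ++ " DIO " ++ PySem.List.pyGetD info 1 "" ++ " Seg " ++ PySem.List.pyGetD info 2 "" ++ " Bit " ++ PySem.List.pyGetD info 3 "")),
   ("GN1640T", (3, fun info => "// GN1640 Addr " ++ PySem.List.pyGetD info 0 "" ++ " Col " ++ PySem.List.pyGetD info 1 "" ++ " Row " ++ PySem.List.pyGetD info 2 "")),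
   ("WS2812", (1, fun info => "// WS2812 Index " ++ PySem.List.pyGetD info 0 ""))]

def generate_comment_alt (device : String) (info_type : String) (info_values : String) : String :=
  match PySem.Dict.get? pvTemplates device with
  | none => "// No Info"
  | some (minLen, tmpl) =>
    let info := ((PySem.Str.split? info_values ",").getD []).map PySem.Str.strip
    if info.length < minLen then "// No Info" else tmpl info

-- ===== PRECONDITION & SPEC =====
def Spec_generate_comment (device : String) (info_type : String) (info_values : String) (out : String) : Prop := out = generate_comment_alt device info_type info_values
instance (device : String) (info_type : String) (info_values : String) (out : String) : Decidable (Spec_generate_comment device info_type info_values out) := by unfold Spec_generate_comment; infer_instance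

-- ===== CLAIM (what is proved, stated in full; the proofs are below) =====
def Claim_equal_generate_comment : Prop := ∀ (device : String) (info_type : String) (info_values : String), Dom_generate_comment device info_type info_values → Spec_generate_comment device info_type info_values (generate_comment device info_type info_values)

-- ===== LEMMAS AND PROOFS =====

-- ===== VERDICT (by name: the statement is the Claim_ definition above) =====
theorem generate_comment_spec : Claim_equal_generate_comment := by
  intro device info_type info_values _
  unfold Spec_generate_comment generate_comment generate_comment_alt pvTemplates PySem.Dict.get?
  by_cases h1 : device = "GPIO" <;> by_cases h2 : device = "GAUGE" <;>
    by_cases h3 : device = "PCA9555" <;> by_cases h4 : device = "TM1637" <;>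
    by_cases h5 : device = "GN1640T" <;> by_cases h6 : device = "WS2812" <;>
    simp_all [List.find?, beq_eq_decide, eq_comm (b := device)] <;> split_ifs <;> first | rfl | omega | simp_all
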